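-- pv_equiv track=rewrite | github.com/hobolee/ENV_time_interpolation | lib.py | cal_valid_time
-- ===== SOURCE A (Python) =====
-- def cal_valid_time(t_data, interval=72):
--     """
--     Find the missing data interval longer than interval. Return valid segmentation
--     :param t_data: time series data with missing data marked as -99999
--     :param interval: interval, hours
--     :return: 2 lists, [start_1, ..., start_n], [end_1, ..., end_n]
--     """
--     state = 'invalid'
--     state_count = 0
--     start_t = []
--     end_t = []
--     for i, d in enumerate(t_data):
--         if d != -99999:
--             if state == 'invalid':
--                 state = 'valid'
--                 start_t.append(i)
--             state_count = 0
--         else: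
--             if state == 'invalid':
--                 continue
--             else:
--                 if state_count >= interval:
--                     state = 'invalid'
--                     state_count = 0
--                     end_t.append(i - interval - 1)
--                 else:
--                     state_count += 1
--     if len(start_t) > len(end_t):
--         end_t.append(len(t_data) - 1)
--     return start_t, end_t
-- ===== SOURCE B (Python) =====
-- from itertools import groupby
--
-- def cal_valid_time(t_data, interval=72):
--     """Run-level pass: group the series into maximal valid/missing runs; a
--     segment starts at the first valid run and is closed just before any
--     missing run longer than interval."""
--     start_t, end_t = [], []
--     in_seg = False
--     pos = 0
--     for missing, grp in groupby(t_data, key=lambda d: d == -99999):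
--         n = sum(1 for _ in grp)
--         if not missing:
--             if not in_seg:
--                 start_t.append(pos)
--                 in_seg = True
--         elif in_seg and n > interval:
--             end_t.append(pos - 1)
--             in_seg = False
--         pos += n
--     if in_seg:
--         end_t.append(len(t_data) - 1)
--     return start_t, end_t
-- ===== Notes on version B (the rewrite author's own statement) =====
-- stated objective: alternative
-- what changed: Replaces the per-element state machine with counter by an itertools.groupby run-level pass: maximal valid/missing runs, closing a segment just before any missing run longer than interval; Pre_ restricts to the natural domain 0 <= interval (interval is a duration in hours), since for negative interval A's end index i - interval - 1 is an artefact of its counter.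
-- outside the precondition, e.g. on cal_valid_time([5, -99999], -1): A returns ([0], [1]), B returns ([0], [0])
import Mathlib
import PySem

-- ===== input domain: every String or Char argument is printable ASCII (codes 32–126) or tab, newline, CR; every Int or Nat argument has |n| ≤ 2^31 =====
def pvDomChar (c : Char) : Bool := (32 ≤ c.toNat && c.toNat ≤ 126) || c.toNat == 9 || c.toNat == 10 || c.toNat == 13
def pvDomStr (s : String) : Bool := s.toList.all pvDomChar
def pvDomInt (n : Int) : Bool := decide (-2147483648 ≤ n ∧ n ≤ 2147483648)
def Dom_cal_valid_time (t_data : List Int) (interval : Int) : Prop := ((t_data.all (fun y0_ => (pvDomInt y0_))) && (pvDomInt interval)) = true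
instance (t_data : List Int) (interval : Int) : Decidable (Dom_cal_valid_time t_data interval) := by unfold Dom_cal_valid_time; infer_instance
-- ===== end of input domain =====

-- B replaces A's per-element state machine with a run-level pass over maximal
-- valid/missing runs (itertools.groupby); same asymptotic cost, different decomposition.


-- ===== PORT A =====
-- A's for-loop over enumerate(t_data), transcribed as structural recursion carrying
-- the index i, the state ('valid' = true), state_count, start_t, end_t.
def pvLoopA (interval : Int) : List Int → Int → Bool → Int → List Int → List Int → List Int × List Int
  | [], _, _, _, s, e => (s, e)
  | d :: rest, i, valid, cnt, s, e =>
    if d ≠ -99999 then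
      if valid then pvLoopA interval rest (i+1) true 0 s e
      else pvLoopA interval rest (i+1) true 0 (s ++ [i]) e
    else
      if !valid then pvLoopA interval rest (i+1) false cnt s e   -- continue
      else
        if cnt ≥ interval then pvLoopA interval rest (i+1) false 0 s (e ++ [i - interval - 1])
        else pvLoopA interval rest (i+1) true (cnt+1) s e

def cal_valid_time (t_data : List Int) (interval : Int) : List Int × List Int :=
  let r := pvLoopA interval t_data 0 false 0 [] []
  if r.1.length > r.2.length then (r.1, r.2 ++ [(t_data.length : Int) - 1]) else r

-- ===== PORT B =====
-- itertools.groupby on (d == -99999): the maximal runs as (missing?, length) pairs.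
def pvRunsB : List Int → List (Bool × Nat)
  | [] => []
  | d :: rest =>
    (decide (d = -99999),
      (rest.takeWhile (fun x => decide (x = -99999) == decide (d = -99999))).length + 1)
      :: pvRunsB (rest.dropWhile (fun x => decide (x = -99999) == decide (d = -99999)))
termination_by l => l.length
decreasing_by
  simpa using Nat.lt_succ_of_le (List.length_dropWhile_le _ _)

-- B's run loop: returns (in_seg, start_t, end_t).
def pvLoopB (interval : Int) : List (Bool × Nat) → Bool → Int → List Int → List Int → Bool × List Int × List Int
  | [], inSeg, _, s, e => (inSeg, s, e)
  | (missing, n) :: rs, inSeg, pos, s, e =>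
    if !missing then
      if !inSeg then pvLoopB interval rs true (pos + n) (s ++ [pos]) e
      else pvLoopB interval rs true (pos + n) s e
    else
      if inSeg && (n : Int) > interval then
        pvLoopB interval rs false (pos + n) s (e ++ [pos - 1])
      else pvLoopB interval rs inSeg (pos + n) s e

def cal_valid_time_alt (t_data : List Int) (interval : Int) : List Int × List Int :=
  let r := pvLoopB interval (pvRunsB t_data) false 0 [] []
  if r.1 then (r.2.1, r.2.2 ++ [(t_data.length : Int) - 1]) else (r.2.1, r.2.2)

-- ===== PRECONDITION & SPEC =====
-- Pre_ restricts to the function's natural domain 0 ≤ interval (interval is a duration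
-- in hours); for negative interval A's end index i - interval - 1 is an artefact of its
-- per-element counter and A still returns there, so those inputs are excluded.
def Pre_cal_valid_time (t_data : List Int) (interval : Int) : Prop := 0 ≤ interval
instance (t_data : List Int) (interval : Int) : Decidable (Pre_cal_valid_time t_data interval) := by unfold Pre_cal_valid_time; infer_instance

def pvWitness_cal_valid_time : List Int × Int := ([3, -99999, -99999, 7], 1)

def Spec_cal_valid_time (t_data : List Int) (interval : Int) (out : List Int × List Int) : Prop := out = cal_valid_time_alt t_data interval
instance (t_data : List Int) (interval : Int) (out : List Int × List Int) : Decidable (Spec_cal_valid_time t_data interval out) := by unfold Spec_cal_valid_time; infer_instance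

-- ===== CLAIM (what is proved, stated in full; the proofs are below) =====
def Claim_equal_cal_valid_time : Prop := ∀ (t_data : List Int) (interval : Int), Dom_cal_valid_time t_data interval → Pre_cal_valid_time t_data interval → Spec_cal_valid_time t_data interval (cal_valid_time t_data interval)

-- ===== LEMMAS AND PROOFS =====

-- A's loop over a run of valid elements keeps state (true, 0).
theorem pvLoopA_valid_run (interval : Int) (pre : List Int) (h : ∀ x ∈ pre, x ≠ -99999) :
    ∀ (r : List Int) (i : Int) (s e : List Int),
    pvLoopA interval (pre ++ r) i true 0 s e = pvLoopA interval r (i + pre.length) true 0 s e := by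
  induction pre with
  | nil => intro r i s e; simp
  | cons d pre ih =>
    intro r i s e
    have hd : d ≠ -99999 := h d (by simp)
    simp only [List.cons_append, pvLoopA, if_pos hd, if_true]
    rw [ih (fun x hx => h x (by simp [hx]))]
    simp only [List.length_cons]; push_cast; ring_nf

-- A's loop over a run of missing elements while invalid skips them.
theorem pvLoopA_invalid_run (interval : Int) (pre : List Int) (h : ∀ x ∈ pre, x = -99999) :
    ∀ (r : List Int) (i cnt : Int) (s e : List Int),
    pvLoopA interval (pre ++ r) i false cnt s e = pvLoopA interval r (i + pre.length) false cnt s e := by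
  induction pre with
  | nil => intro r i cnt s e; simp
  | cons d pre ih =>
    intro r i cnt s e
    have hd : d = -99999 := h d (by simp)
    subst hd
    simp only [List.cons_append, pvLoopA]
    rw [if_neg (show ¬((-99999:Int) ≠ -99999) by simp)]
    simp only [Bool.not_false, if_true]
    rw [ih (fun x hx => h x (by simp [hx]))]
    simp only [List.length_cons]; push_cast; ring_nf

-- A's loop over a run of missing elements while valid, counting from c with 0 ≤ c ≤ interval:
-- either the whole run fits or it closes, recording i - c - 1.
theorem pvLoopA_missing_run (interval : Int) (pre : List Int) (h : ∀ x ∈ pre, x = -99999) :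
    ∀ (r : List Int) (i c : Int) (s e : List Int), 0 ≤ c → c ≤ interval →
    pvLoopA interval (pre ++ r) i true c s e =
      if (c + pre.length : Int) > interval
      then pvLoopA interval r (i + pre.length) false 0 s (e ++ [i - c - 1])
      else pvLoopA interval r (i + pre.length) true (c + pre.length) s e := by
  induction pre with
  | nil =>
    intro r i c s e hc hci
    rw [if_neg (by simp; omega)]
    simp
  | cons d pre ih =>
    intro r i c s e hc hci
    have hd : d = -99999 := h d (by simp)
    subst hd
    have hmem : ∀ x ∈ pre, x = -99999 := fun x hx => h x (by simp [hx])
    simp only [List.cons_append, pvLoopA]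
    rw [if_neg (show ¬((-99999:Int) ≠ -99999) by simp)]
    simp only [Bool.not_true, Bool.false_eq_true, if_false]
    by_cases hcl : c ≥ interval
    · have hce : c = interval := le_antisymm hci hcl
      subst hce
      rw [if_pos hcl, pvLoopA_invalid_run _ pre hmem]
      split_ifs with hg
      · simp only [List.length_cons]; push_cast; ring_nf
      · exfalso; simp only [List.length_cons] at hg; push_cast at hg; omega
    · rw [if_neg hcl, ih hmem r (i+1) (c+1) s e (by omega) (by omega)]
      split_ifs with h1 h2 h2
      · simp only [List.length_cons]; push_cast; ring_nf
      · exfalso; simp only [List.length_cons] at h1 h2; push_cast at h1 h2; omega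
      · exfalso; simp only [List.length_cons] at h1 h2; push_cast at h1 h2; omega
      · simp only [List.length_cons]; push_cast; ring_nf

theorem pv_dropWhile_head (p : Int → Bool) (l : List Int) :
    ∀ d rest, l.dropWhile p = d :: rest → p d = false := by
  induction l with
  | nil => intro d rest h; simp at h
  | cons a l ih =>
    intro d rest h
    by_cases ha : p a
    · rw [List.dropWhile_cons_of_pos ha] at h; exact ih d rest h
    · rw [List.dropWhile_cons_of_neg ha] at h
      cases h; simpa using ha

-- Length invariant of B's run loop: #start = #end + (in_seg ? 1 : 0).
theorem pvLoopB_inv (interval : Int) :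
    ∀ (rs : List (Bool × Nat)) (inSeg : Bool) (pos : Int) (s e : List Int),
    s.length = e.length + (if inSeg then 1 else 0) →
    (pvLoopB interval rs inSeg pos s e).2.1.length =
      (pvLoopB interval rs inSeg pos s e).2.2.length +
        (if (pvLoopB interval rs inSeg pos s e).1 then 1 else 0) := by
  intro rs
  induction rs with
  | nil => intro inSeg pos s e h; simpa [pvLoopB] using h
  | cons hd rs ih =>
    intro inSeg pos s e h
    obtain ⟨missing, n⟩ := hd
    simp only [pvLoopB]
    by_cases hm : missing = true
    · subst hm
      simp only [Bool.not_true, Bool.false_eq_true, if_false]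
      by_cases hc : (inSeg && ((n : Int) > interval)) = true
      · rw [if_pos hc]
        have hseg : inSeg = true := by revert hc; cases inSeg <;> simp
        apply ih; simp [hseg] at h ⊢; omega
      · rw [if_neg hc]; exact ih _ _ _ _ h
    · have hm' : missing = false := by simpa using hm
      subst hm'
      simp only [Bool.not_false, if_true]
      by_cases hs : inSeg = true
      · simp only [hs, Bool.not_true, Bool.false_eq_true, if_false]
        exact ih _ _ _ _ (by simpa [hs] using h)
      · have hs' : inSeg = false := by simpa using hs
        subst hs'
        simp only [Bool.not_false, if_true]
        apply ih; simp at h ⊢; omega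

-- Main correspondence: A's element loop equals B's run loop on the run decomposition.
theorem pv_main (interval : Int) (hiv : 0 ≤ interval) :
    ∀ (N : Nat) (t : List Int), t.length ≤ N →
    ∀ (i : Int) (inSeg : Bool) (cnt : Int) (s e : List Int),
    0 ≤ cnt →
    (inSeg = true → ∀ d rest, t = d :: rest → d = -99999 → cnt = 0) →
    pvLoopA interval t i inSeg cnt s e = (pvLoopB interval (pvRunsB t) inSeg i s e).2 := by
  intro N
  induction N with
  | zero =>
    intro t ht i inSeg cnt s e _ _
    have ht0 : t = [] := List.eq_nil_of_length_eq_zero (Nat.le_zero.mp ht)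
    subst ht0; simp [pvLoopA, pvRunsB, pvLoopB]
  | succ N ihN =>
    intro t ht i inSeg cnt s e hcnt hrun
    cases t with
    | nil => simp [pvLoopA, pvRunsB, pvLoopB]
    | cons d rest =>
      set p : Int → Bool := fun x => decide (x = -99999) == decide (d = -99999) with hp
      set tk := rest.takeWhile p with htk
      set tl := rest.dropWhile p with htl
      have hsplit : rest = tk ++ tl := (List.takeWhile_append_dropWhile).symm
      have htlN : tl.length ≤ N := by
        have h1 : tl.length ≤ rest.length := List.length_dropWhile_le _ _
        simp at ht; omega
      rw [show pvRunsB (d :: rest) =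
            (decide (d = -99999), tk.length + 1) :: pvRunsB tl by rw [pvRunsB]]
      by_cases hm : d = -99999
      · -- missing run
        have hmv : decide (d = -99999) = true := by simp [hm]
        have hpre : ∀ x ∈ tk, x = -99999 := by
          intro x hx
          have := List.mem_takeWhile_imp hx
          simp [hp, hmv] at this; exact this
        have hall : ∀ x ∈ d :: tk, x = -99999 := by
          intro x hx; rcases List.mem_cons.mp hx with h1 | h2
          · exact h1.trans hm
          · exact hpre x h2
        have htl_head : ∀ d' r', tl = d' :: r' → d' ≠ -99999 := by
          intro d' r' hdr
          have := pv_dropWhile_head p rest d' r' (htl ▸ hdr)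
          simp [hp, hmv] at this; exact this
        have hA : (d :: rest) = (d :: tk) ++ tl := by rw [hsplit]; simp
        simp only [pvLoopB, hmv, Bool.not_true, Bool.false_eq_true, if_false]
        by_cases hs : inSeg = true
        · subst hs
          have hc0 : cnt = 0 := hrun rfl d rest rfl hm
          subst hc0
          simp only [Bool.true_and, decide_eq_true_eq]
          rw [hA, pvLoopA_missing_run interval (d :: tk) hall tl i 0 s e le_rfl hiv]
          rw [ihN tl htlN (i + (((d :: tk)).length : Nat)) false 0 s (e ++ [i - 0 - 1])
                le_rfl (fun h => absurd h (by simp))]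
          rw [ihN tl htlN (i + (((d :: tk)).length : Nat)) true
                (0 + (((d :: tk)).length : Nat)) s e (by positivity)
                (fun _ d' r' hdr hd' => absurd hd' (htl_head d' r' hdr))]
          split_ifs with h1 h2 h2
          · simp only [List.length_cons]; push_cast; try ring_nf
          · exfalso; simp only [List.length_cons] at h1; omega
          · exfalso; simp only [List.length_cons] at h1; omega
          · simp only [List.length_cons]
        · have hs' : inSeg = false := by simpa using hs
          subst hs'
          simp only [pvLoopA]
          rw [if_neg (show ¬(d ≠ -99999) by simp [hm])]
          simp only [Bool.not_false, if_true]
          rw [show rest = tk ++ tl from hsplit, pvLoopA_invalid_run interval tk hpre]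
          simp only [Bool.false_and, Bool.false_eq_true, if_false]
          rw [ihN tl htlN (i + 1 + (tk.length : Nat)) false cnt s e hcnt
                (fun h => absurd h (by simp))]
          push_cast; ring_nf
      · -- valid run
        have hmv : decide (d = -99999) = false := by simp [hm]
        have hpre : ∀ x ∈ tk, x ≠ -99999 := by
          intro x hx
          have := List.mem_takeWhile_imp hx
          simp [hp, hmv] at this; exact this
        simp only [pvLoopA, if_pos hm]
        simp only [pvLoopB, hmv, Bool.not_false, if_true]
        rw [show rest = tk ++ tl from hsplit]
        simp only [pvLoopA_valid_run interval tk hpre]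
        have hrec : ∀ s' : List Int,
            pvLoopA interval tl (i + 1 + ((tk.length : Nat) : Int)) true 0 s' e =
              (pvLoopB interval (pvRunsB tl) true (i + ((tk.length + 1 : Nat) : Int)) s' e).2 := by
          intro s'
          rw [ihN tl htlN (i + 1 + ((tk.length : Nat) : Int)) true 0 s' e le_rfl
                (fun _ d' r' _ _ => rfl)]
          push_cast; ring_nf
        by_cases hsg : inSeg = true
        · subst hsg
          simp only [Bool.not_true, Bool.false_eq_true, if_false]
          exact hrec s
        · have hs' : inSeg = false := by simpa using hsg
          subst hs'
          simp only [Bool.not_false, if_true, Bool.false_eq_true, if_false]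
          exact hrec (s ++ [i])

-- ===== VERDICT (by name: the statement is the Claim_ definition above) =====
theorem cal_valid_time_spec : Claim_equal_cal_valid_time := by
  intro t_data interval _ hpre
  unfold Spec_cal_valid_time cal_valid_time cal_valid_time_alt
  have hmain := pv_main interval hpre t_data.length t_data
    le_rfl 0 false 0 [] [] le_rfl (fun h => absurd h (by simp))
  have hinv := pvLoopB_inv interval (pvRunsB t_data) false 0 [] [] (by simp)
  simp only []
  rw [hmain]
  set r := pvLoopB interval (pvRunsB t_data) false 0 [] [] with hr
  by_cases hb : r.1 = true
  · rw [if_pos hb, if_pos (show r.2.1.length > r.2.2.length by rw [hinv]; simp [hb])]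
  · have hb' : r.1 = false := by simpa using hb
    rw [if_neg (show ¬(r.1 = true) by simp [hb']),
        if_neg (show ¬(r.2.1.length > r.2.2.length) by rw [hinv]; simp [hb'])]
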